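-- pv_equiv track=rewrite | github.com/Preston-Cook/w3-schools-practice | practice.py | consec_zero_test
-- ===== SOURCE A (Python) =====
-- def consec_zero_test(s1):
--     zero_count = 0
--
--     for char in s1:
--         if char != '0':
--             break
--         zero_count += 1
--
--     if len(s1) % zero_count != 0 or len(set(s1)) != 2:
--         return False
--
--     for i in range(len(s1) // zero_count):
--         slice = s1[i * zero_count: (i + 1) * zero_count]
--         if i % 2 == 0 and slice.count('0') != zero_count:
--             return False
--         elif i % 2 == 1 and slice.count('1') != zero_count:
--             return False
--     return True
-- ===== SOURCE B (Python) =====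
-- def consec_zero_test(s1):
--     k = len(s1) - len(s1.lstrip('0'))
--     q, r = divmod(len(s1), k)
--     if r != 0 or q < 2:
--         return False
--     return all(c == ('0' if (i // k) % 2 == 0 else '1') for i, c in enumerate(s1))
-- ===== Notes on version B (the rewrite author's own statement) =====
-- stated objective: simpler
-- what changed: replaces A's set-size guard and per-block slice-and-count verification loop by a divmod guard (remainder 0, at least 2 blocks) and a single per-character positional parity check c == ('0' if (i//k)%2==0 else '1')
import Mathlib
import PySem

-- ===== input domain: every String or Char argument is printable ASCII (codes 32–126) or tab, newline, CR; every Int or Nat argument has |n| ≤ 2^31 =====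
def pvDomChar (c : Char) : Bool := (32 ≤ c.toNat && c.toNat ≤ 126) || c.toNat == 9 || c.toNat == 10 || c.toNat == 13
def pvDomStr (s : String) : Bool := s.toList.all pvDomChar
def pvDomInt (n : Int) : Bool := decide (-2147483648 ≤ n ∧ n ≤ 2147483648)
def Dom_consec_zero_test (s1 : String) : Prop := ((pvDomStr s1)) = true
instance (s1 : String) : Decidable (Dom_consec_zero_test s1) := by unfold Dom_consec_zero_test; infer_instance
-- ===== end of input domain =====

-- B replaces A's set-size guard and per-block slice-and-count loop by a divmod guard and a
-- single per-character positional parity check (objective: simpler).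

-- ===== PORT A =====
-- 'for char in s1: if char != "0": break; zero_count += 1'
def pvZeroCount : List Char → Int
  | [] => 0
  | c :: rest => if c ≠ '0' then 0 else pvZeroCount rest + 1

-- 'for i in range(len(s1) // zero_count): … return False / continue'
def pvLoopA (cs : List Char) (zc : Int) : List Int → Bool
  | [] => true
  | i :: rest =>
      let sl := PySem.List.slice cs (some (i * zc)) (some ((i + 1) * zc))
      if PySem.Int.mod i 2 = 0 ∧ ((PySem.List.count sl '0' : Nat) : Int) ≠ zc then false
      else if PySem.Int.mod i 2 = 1 ∧ ((PySem.List.count sl '1' : Nat) : Int) ≠ zc then false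
      else pvLoopA cs zc rest

def consec_zero_test (s1 : String) : Bool :=
  let cs := s1.toList
  let zc := pvZeroCount cs
  if PySem.Int.mod (PySem.Str.len s1) zc ≠ 0 ∨ PySem.Set.len (PySem.Set.ofList cs) ≠ 2 then false
  else pvLoopA cs zc (PySem.List.pyRange 0 (PySem.Int.floordiv (PySem.Str.len s1) zc) 1)

-- ===== PORT B =====
def consec_zero_test_alt (s1 : String) : Bool :=
  let cs := s1.toList
  -- k = len(s1) - len(s1.lstrip('0')); s.lstrip('0') drops exactly the leading '0' chars (exact hand port)
  let k : Int := (cs.length : Int) - ((cs.dropWhile (· == '0')).length : Int)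
  match PySem.Int.divmod? (cs.length : Int) k with
  | none => false   -- 'divmod(len(s1), k)' raises ZeroDivisionError in Python (k = 0, outside Pre_)
  | some (q, r) =>
      if r ≠ 0 ∨ q < 2 then false
      else (PySem.List.enumerate cs).all
        (fun p => p.2 == (if PySem.Int.mod (PySem.Int.floordiv p.1 k) 2 = 0 then '0' else '1'))

-- ===== PRECONDITION & SPEC =====
-- Pre_ excludes exactly the inputs on which A raises ZeroDivisionError (leading-zero
-- count zero: the string is empty or its first character is not a zero digit).
def Pre_consec_zero_test (s1 : String) : Prop := PySem.Str.startswith s1 "0" = true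
instance (s1 : String) : Decidable (Pre_consec_zero_test s1) := by unfold Pre_consec_zero_test; infer_instance
def pvWitness_consec_zero_test : String := "0011"

def Spec_consec_zero_test (s1 : String) (out : Bool) : Prop := out = consec_zero_test_alt s1
instance (s1 : String) (out : Bool) : Decidable (Spec_consec_zero_test s1 out) := by unfold Spec_consec_zero_test; infer_instance

-- ===== CLAIM (what is proved, stated in full; the proofs are below) =====
def Claim_equal_consec_zero_test : Prop := ∀ (s1 : String), Dom_consec_zero_test s1 → Pre_consec_zero_test s1 → Spec_consec_zero_test s1 (consec_zero_test s1)

-- ===== LEMMAS AND PROOFS =====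

-- the character of the i-th block of the alternating pattern
def altChar (i : Nat) : Char := if i % 2 = 0 then '0' else '1'
-- the alternating pattern of m blocks of size k
def EpatN (k m : Nat) : List Char := (List.range m).flatMap (fun i => List.replicate k (altChar i))

-- A's leading-zero loop counts the longest '0'-prefix
lemma pvZeroCount_eq (cs : List Char) :
    pvZeroCount cs = ((cs.takeWhile (· == '0')).length : Int) := by
  induction cs with
  | nil => simp [pvZeroCount]
  | cons c rest ih =>
      rw [List.takeWhile_cons]
      by_cases h : c = '0'
      · subst h; simp [pvZeroCount, ih]
      · simp [pvZeroCount, h]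

-- a block check: count of c in a length-k list equals k iff the list is replicate k c
lemma count_block_iff {l : List Char} {k : Nat} {c : Char} (hl : l.length = k) :
    (PySem.List.count l c = k) ↔ l = List.replicate k c := by
  rw [PySem.List.count_eq, List.eq_replicate_iff]
  constructor
  · intro h
    refine ⟨hl, ?_⟩
    intro b hb
    exact ((List.count_eq_length).1 (by omega) b hb).symm
  · rintro ⟨-, h⟩
    rw [← hl]
    exact (List.count_eq_length).2 (fun b hb => (h b hb).symm)

-- main loop invariant: A's verification loop over indices j..j+m-1 succeeds iff the
-- corresponding suffix of cs equals the expected flatMap pattern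
lemma loopA_eq_expected (kN : Nat) (hk : 1 ≤ kN) :
    ∀ (m j : Nat) (cs : List Char),
      (cs.drop (j * kN)).length = m * kN →
      pvLoopA cs (kN : Int) (PySem.List.pyRange (j : Int) ((j : Int) + (m : Int)) 1)
        = decide (cs.drop (j * kN) =
            (PySem.List.pyRange (j : Int) ((j : Int) + (m : Int)) 1).flatMap
              (fun i => if PySem.Int.mod i 2 = 0 then List.replicate kN '0' else List.replicate kN '1')) := by
  intro m
  induction m with
  | zero =>
      intro j cs hlen
      have h0 : (j : Int) + ((0 : Nat) : Int) = (j : Int) := by simp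
      rw [h0, PySem.List.pyRange_one_eq_nil le_rfl]
      have hnil : cs.drop (j * kN) = [] := List.eq_nil_of_length_eq_zero (by simpa using hlen)
      simp [pvLoopA, hnil]
  | succ m ih =>
      intro j cs hlen
      rw [PySem.List.pyRange_one_cons (by push_cast; omega)]
      have hj1 : (j : Int) + 1 = ((j + 1 : Nat) : Int) := by push_cast; ring
      have hend : (j : Int) + ((m + 1 : Nat) : Int) = (((j + 1 : Nat) : Int)) + (m : Int) := by push_cast; ring
      rw [hj1, hend]
      set l : List Char := cs.drop (j * kN) with hldef
      have hlen' : l.length = (m + 1) * kN := hlen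
      have hslice : PySem.List.slice cs (some ((j : Int) * (kN : Int))) (some (((j + 1 : Nat) : Int) * (kN : Int)))
          = l.take kN := by
        rw [PySem.List.slice_toNat cs (by positivity) (by positivity)]
        have h1 : ((j : Int) * (kN : Int)).toNat = j * kN := by
          rw [← Nat.cast_mul, Int.toNat_natCast]
        have h2 : (((j + 1 : Nat) : Int) * (kN : Int)).toNat = (j + 1) * kN := by
          rw [← Nat.cast_mul, Int.toNat_natCast]
        rw [h1, h2, hldef]
        have h3 : (j + 1) * kN - j * kN = kN := by rw [Nat.succ_mul, Nat.add_sub_cancel_left]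
        rw [h3]
      have htlen : (l.take kN).length = kN := by
        rw [List.length_take, hlen']
        exact Nat.min_eq_left (Nat.le_mul_of_pos_left kN (Nat.succ_pos m))
      have hdrop : l.drop kN = cs.drop ((j + 1) * kN) := by
        rw [hldef, List.drop_drop]
        have : j * kN + kN = (j + 1) * kN := (Nat.succ_mul j kN).symm
        rw [this]
      have hdlen : (cs.drop ((j + 1) * kN)).length = m * kN := by
        rw [← hdrop, List.length_drop, hlen', Nat.succ_mul, Nat.add_sub_cancel]
      have hmod : PySem.Int.mod (j : Int) 2 = ((j % 2 : Nat) : Int) := by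
        exact_mod_cast PySem.Int.mod_natCast j 2
      set c : Char := if j % 2 = 0 then '0' else '1' with hc
      have hloop : pvLoopA cs (kN : Int)
            ((j : Int) :: PySem.List.pyRange (((j + 1 : Nat) : Int)) ((((j + 1 : Nat) : Int)) + (m : Int)) 1)
          = if PySem.List.count (l.take kN) c = kN
            then pvLoopA cs (kN : Int) (PySem.List.pyRange (((j + 1 : Nat) : Int)) ((((j + 1 : Nat) : Int)) + (m : Int)) 1)
            else false := by
        simp only [pvLoopA, hj1, hslice, hmod]
        rcases Nat.even_or_odd j with he | ho
        · have h0 : j % 2 = 0 := Nat.even_iff.mp he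
          simp only [hc, h0]
          by_cases hcount : PySem.List.count (l.take kN) '0' = kN
          · simp
          · simp
        · have h1 : j % 2 = 1 := Nat.odd_iff.mp ho
          simp only [hc, h1]
          by_cases hcount : PySem.List.count (l.take kN) '1' = kN
          · simp
          · simp
      rw [hloop, List.flatMap_cons]
      have hcblock : (if PySem.Int.mod (j : Int) 2 = 0 then List.replicate kN '0' else List.replicate kN '1')
          = List.replicate kN c := by
        rw [hmod, hc]
        by_cases h0 : j % 2 = 0
        · simp [h0]
        · simp only [h0, if_false]
          rw [if_neg (by omega)]
      rw [hcblock]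
      set E' := (PySem.List.pyRange (((j + 1 : Nat) : Int)) ((((j + 1 : Nat) : Int)) + (m : Int)) 1).flatMap
          (fun i => if PySem.Int.mod i 2 = 0 then List.replicate kN '0' else List.replicate kN '1') with hE'
      have hsplit : (l = List.replicate kN c ++ E') ↔ (l.take kN = List.replicate kN c ∧ l.drop kN = E') := by
        constructor
        · intro h
          constructor
          · rw [h]; exact List.take_left' (by simp)
          · rw [h]; exact List.drop_left' (by simp)
        · rintro ⟨h1, h2⟩
          rw [← List.take_append_drop kN l, h1, h2]
      by_cases hcount : PySem.List.count (l.take kN) c = kN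
      · have hrep : l.take kN = List.replicate kN c := (count_block_iff htlen).1 hcount
        rw [if_pos hcount, ih (j + 1) cs hdlen, ← hdrop]
        simp only [decide_eq_decide]
        rw [← hE', hsplit]
        exact ⟨fun h => ⟨hrep, h⟩, fun h => h.2⟩
      · rw [if_neg hcount]
        have hne : l ≠ List.replicate kN c ++ E' := by
          intro h
          exact hcount ((count_block_iff htlen).2 (hsplit.1 h).1)
        simp [hne]

-- the pyRange form of the pattern appearing in A's loop equals EpatN
lemma Epat_cast (k : Nat) : ∀ (m : Nat),
    (PySem.List.pyRange 0 (m : Int) 1).flatMap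
        (fun i => if PySem.Int.mod i 2 = 0 then List.replicate k '0' else List.replicate k '1')
      = EpatN k m := by
  intro m
  induction m with
  | zero => simp [EpatN, PySem.List.pyRange_one_eq_nil]
  | succ m ih =>
      have hr : PySem.List.pyRange 0 ((m + 1 : Nat) : Int) 1
          = PySem.List.pyRange 0 (m : Int) 1 ++ [(m : Int)] := by
        have := PySem.List.pyRange_one_succ_right (a := 0) (b := (m : Int)) (by exact_mod_cast Nat.zero_le m)
        simpa [Nat.cast_add] using this
      rw [hr, List.flatMap_append, ih]
      simp only [List.flatMap_cons, List.flatMap_nil, List.append_nil]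
      have hmod : PySem.Int.mod (m : Int) 2 = ((m % 2 : Nat) : Int) := by
        exact_mod_cast PySem.Int.mod_natCast m 2
      have hblock : (if PySem.Int.mod (m : Int) 2 = 0 then List.replicate k '0' else List.replicate k '1')
          = List.replicate k (altChar m) := by
        rw [hmod, altChar]
        by_cases h0 : m % 2 = 0
        · simp [h0]
        · simp only [h0, if_false]
          rw [if_neg (by exact_mod_cast h0)]
      rw [hblock]
      simp [EpatN, List.range_succ]

lemma length_EpatN (k : Nat) : ∀ m, (EpatN k m).length = m * k := by
  intro m
  induction m with
  | zero => simp [EpatN]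
  | succ m ih =>
      have hsplit : EpatN k (m + 1) = EpatN k m ++ List.replicate k (altChar m) := by
        simp [EpatN, List.range_succ]
      rw [hsplit, List.length_append, ih, List.length_replicate, Nat.succ_mul]

lemma mem_EpatN (k m : Nat) (hk : 1 ≤ k) (hm : 2 ≤ m) :
    ∀ x, x ∈ EpatN k m ↔ (x = '0' ∨ x = '1') := by
  intro x
  constructor
  · intro hx
    obtain ⟨i, _, hxi⟩ := List.mem_flatMap.mp hx
    have := (List.eq_of_mem_replicate hxi)
    rw [this]
    unfold altChar
    by_cases h : i % 2 = 0 <;> simp [h]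
  · intro hx
    apply List.mem_flatMap.mpr
    rcases hx with rfl | rfl
    · exact ⟨0, List.mem_range.mpr (by omega), by
        have : altChar 0 = '0' := by simp [altChar]
        rw [this]; exact List.mem_replicate.mpr ⟨by omega, rfl⟩⟩
    · exact ⟨1, List.mem_range.mpr (by omega), by
        have : altChar 1 = '1' := by simp [altChar]
        rw [this]; exact List.mem_replicate.mpr ⟨by omega, rfl⟩⟩

lemma nodup_len_pair (L : List Char) (hn : L.Nodup) (h : ∀ x, x ∈ L ↔ (x = '0' ∨ x = '1')) :
    L.length = 2 := by
  have hperm : L.Perm ['0', '1'] := by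
    rw [List.perm_ext_iff_of_nodup hn (by decide)]
    intro a
    rw [h a]
    simp
  simpa using hperm.length_eq

lemma nodup_len_single (L : List Char) (hn : L.Nodup) (h : ∀ x, x ∈ L ↔ x = '0') :
    L.length = 1 := by
  have hperm : L.Perm ['0'] := by
    rw [List.perm_ext_iff_of_nodup hn (by decide)]
    intro a
    rw [h a]
    simp
  simpa using hperm.length_eq

lemma setlen_EpatN (k m : Nat) (hk : 1 ≤ k) (hm : 2 ≤ m) :
    PySem.Set.len (PySem.Set.ofList (EpatN k m)) = 2 := by
  have hlen : (PySem.Set.ofList (EpatN k m)).length = 2 := by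
    apply nodup_len_pair
    · exact PySem.Set.nodup_ofList _
    · intro x
      rw [PySem.Set.mem_ofList]
      exact mem_EpatN k m hk hm x
  simp [PySem.Set.len, hlen]

-- Pre_ gives a non-empty '0'-prefix
lemma tw_pos (s1 : String) (hpre : Pre_consec_zero_test s1) :
    1 ≤ (s1.toList.takeWhile (· == '0')).length := by
  unfold Pre_consec_zero_test at hpre
  rw [PySem.Str.startswith_eq] at hpre
  have hpfx : "0".toList <+: s1.toList := (PySem.Chars.startswith_iff _ _).mp hpre
  obtain ⟨t, ht⟩ := hpfx
  have hco : s1.toList.takeWhile (· == '0') = '0' :: t.takeWhile (· == '0') := by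
    rw [← ht]; simp
  rw [hco]; simp

-- characterisation of A
lemma A_true_iff (s1 : String) (hpre : Pre_consec_zero_test s1) :
    consec_zero_test s1 = true ↔
      (s1.toList.length % (s1.toList.takeWhile (· == '0')).length = 0 ∧
       PySem.Set.len (PySem.Set.ofList s1.toList) = 2 ∧
       s1.toList = EpatN (s1.toList.takeWhile (· == '0')).length
         (s1.toList.length / (s1.toList.takeWhile (· == '0')).length)) := by
  have hk := tw_pos s1 hpre
  simp only [consec_zero_test]
  set cs := s1.toList with hcs
  set tw := (cs.takeWhile (· == '0')).length with htw
  have hzc : pvZeroCount cs = (tw : Int) := pvZeroCount_eq cs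
  have hlen : PySem.Str.len s1 = (cs.length : Int) := by simp [hcs]
  rw [hzc, hlen]
  have hmodc : PySem.Int.mod (cs.length : Int) (tw : Int) = ((cs.length % tw : Nat) : Int) :=
    PySem.Int.mod_natCast cs.length tw
  have hdivc : PySem.Int.floordiv (cs.length : Int) (tw : Int) = ((cs.length / tw : Nat) : Int) :=
    PySem.Int.floordiv_natCast cs.length tw
  by_cases h1 : cs.length % tw = 0 ∧ PySem.Set.len (PySem.Set.ofList cs) = 2
  · have hguard : ¬ (PySem.Int.mod (cs.length : Int) (tw : Int) ≠ 0 ∨ PySem.Set.len (PySem.Set.ofList cs) ≠ 2) := by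
      push Not
      refine ⟨by rw [hmodc]; exact_mod_cast h1.1, h1.2⟩
    rw [if_neg hguard]
    set m := cs.length / tw with hm
    have hlm : cs.length = m * tw := by
      rw [hm, Nat.div_mul_cancel (Nat.dvd_of_mod_eq_zero h1.1)]
    have hmain := loopA_eq_expected tw hk m 0 cs (by simpa using hlm)
    simp only [Nat.cast_zero, zero_add, Nat.zero_mul, List.drop_zero] at hmain
    rw [hdivc, hmain, Epat_cast]
    simp only [decide_eq_true_eq]
    constructor
    · intro h; exact ⟨h1.1, h1.2, h⟩
    · intro h; exact h.2.2
  · have hguard : (PySem.Int.mod (cs.length : Int) (tw : Int) ≠ 0 ∨ PySem.Set.len (PySem.Set.ofList cs) ≠ 2) := by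
      by_contra hcon
      push Not at hcon
      apply h1
      refine ⟨?_, hcon.2⟩
      have := hcon.1
      rw [hmodc] at this
      exact_mod_cast this
    rw [if_pos hguard]
    constructor
    · intro h; exact absurd h (by simp)
    · intro h; exact absurd ⟨h.1, h.2.1⟩ h1

-- the i-th character of the pattern is determined by the parity of its block index
lemma getElem_EpatN (k : Nat) : ∀ (m i : Nat) (hi : i < m * k),
    (EpatN k m)[i]'(by rw [length_EpatN]; exact hi) = altChar (i / k) := by
  intro m
  induction m with
  | zero => intro i hi; omega
  | succ m ih =>
      intro i hi
      have hsplit : EpatN k (m + 1) = EpatN k m ++ List.replicate k (altChar m) := by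
        simp [EpatN, List.range_succ]
      by_cases hlt : i < m * k
      · have h1 : i < (EpatN k m).length := by rw [length_EpatN]; exact hlt
        simp only [hsplit]
        rw [List.getElem_append_left h1]
        exact ih i hlt
      · have hge : m * k ≤ i := by omega
        have h1 : ¬ i < (EpatN k m).length := by rw [length_EpatN]; exact hlt
        simp only [hsplit]
        rw [List.getElem_append_right (by omega : (EpatN k m).length ≤ i)]
        have hdiv : i / k = m := Nat.div_eq_of_lt_le hge hi
        rw [List.getElem_replicate, hdiv]

-- the pattern is exactly the positional parity formula
lemma pattern_ext (cs : List Char) (tw : Nat) (hmod : cs.length % tw = 0) :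
    cs = EpatN tw (cs.length / tw) ↔
      ∀ (i : Nat) (hi : i < cs.length), cs[i] = altChar (i / tw) := by
  have hnm : cs.length / tw * tw = cs.length := Nat.div_mul_cancel (Nat.dvd_of_mod_eq_zero hmod)
  constructor
  · intro h i hi
    have hi' : i < cs.length / tw * tw := by omega
    calc cs[i] = (EpatN tw (cs.length / tw))[i]'(by rw [length_EpatN]; omega) := by
          congr 1
      _ = altChar (i / tw) := getElem_EpatN tw _ i hi'
  · intro h
    apply List.ext_getElem
    · rw [length_EpatN]; omega
    · intro i hi hi2
      rw [h i hi]
      exact (getElem_EpatN tw _ i (by omega)).symm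

-- characterisation of B
lemma B_true_iff (s1 : String) (hpre : Pre_consec_zero_test s1) :
    consec_zero_test_alt s1 = true ↔
      (s1.toList.length % (s1.toList.takeWhile (· == '0')).length = 0 ∧
       2 ≤ s1.toList.length / (s1.toList.takeWhile (· == '0')).length ∧
       s1.toList = EpatN (s1.toList.takeWhile (· == '0')).length
         (s1.toList.length / (s1.toList.takeWhile (· == '0')).length)) := by
  have hk := tw_pos s1 hpre
  simp only [consec_zero_test_alt]
  set cs := s1.toList with hcs
  set tw := (cs.takeWhile (· == '0')).length with htw
  have htd : cs.takeWhile (· == '0') ++ cs.dropWhile (· == '0') = cs := List.takeWhile_append_dropWhile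
  have hlensum : (cs.takeWhile (· == '0')).length + (cs.dropWhile (· == '0')).length = cs.length := by
    rw [← List.length_append, htd]
  have hkB : (cs.length : Int) - ((cs.dropWhile (· == '0')).length : Int) = (tw : Int) := by
    push_cast [← hlensum]; ring
  rw [hkB]
  have hdm : PySem.Int.divmod? (cs.length : Int) (tw : Int)
      = some (((cs.length / tw : Nat) : Int), ((cs.length % tw : Nat) : Int)) := by
    rw [show (((cs.length / tw : Nat) : Int)) = PySem.Int.floordiv (cs.length : Int) (tw : Int) from
          (PySem.Int.floordiv_natCast cs.length tw).symm,
        show (((cs.length % tw : Nat) : Int)) = PySem.Int.mod (cs.length : Int) (tw : Int) from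
          (PySem.Int.mod_natCast cs.length tw).symm]
    simp only [PySem.Int.divmod?, PySem.Int.floordiv, PySem.Int.mod,
      ite_eq_right_iff]
    omega
  simp only [hdm]
  by_cases h1 : cs.length % tw = 0 ∧ 2 ≤ cs.length / tw
  · have hguard : ¬ (((cs.length % tw : Nat) : Int) ≠ 0 ∨ ((cs.length / tw : Nat) : Int) < 2) := by
      push Not
      exact ⟨by exact_mod_cast h1.1, by exact_mod_cast h1.2⟩
    rw [if_neg hguard]
    rw [List.all_eq_true]
    rw [pattern_ext cs tw h1.1]
    constructor
    · intro h
      refine ⟨h1.1, h1.2, ?_⟩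
      intro i hi
      have hmem : ((i : Int), cs[i]) ∈ PySem.List.enumerate cs := by
        rw [PySem.List.mem_enumerate_iff]
        exact ⟨i, hi, by simp⟩
      have := h _ hmem
      simp only [beq_iff_eq] at this
      have hfd : PySem.Int.floordiv ((0 : Int) + (i : Nat)) (tw : Int) = ((i / tw : Nat) : Int) := by
        rw [zero_add]; exact PySem.Int.floordiv_natCast i tw
      have hmd : PySem.Int.mod ((i / tw : Nat) : Int) 2 = ((i / tw % 2 : Nat) : Int) := by
        exact_mod_cast PySem.Int.mod_natCast (i / tw) 2
      rw [show ((i : Int)) = ((0 : Int) + (i : Nat)) by simp, hfd, hmd] at this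
      unfold altChar
      by_cases hpar : i / tw % 2 = 0
      · rw [if_pos hpar]
        rw [if_pos (by exact_mod_cast hpar)] at this
        exact this
      · rw [if_neg hpar]
        rw [if_neg (by exact_mod_cast hpar)] at this
        exact this
    · rintro ⟨-, -, h⟩
      intro q hq
      rw [PySem.List.mem_enumerate_iff] at hq
      obtain ⟨i, hi, rfl⟩ := hq
      simp only [beq_iff_eq]
      have hfd : PySem.Int.floordiv ((0 : Int) + (i : Nat)) (tw : Int) = ((i / tw : Nat) : Int) := by
        rw [zero_add]; exact PySem.Int.floordiv_natCast i tw
      have hmd : PySem.Int.mod ((i / tw : Nat) : Int) 2 = ((i / tw % 2 : Nat) : Int) := by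
        exact_mod_cast PySem.Int.mod_natCast (i / tw) 2
      rw [hfd, hmd]
      have := h i hi
      unfold altChar at this
      by_cases hpar : i / tw % 2 = 0
      · rw [if_pos (by exact_mod_cast hpar)]
        rw [if_pos hpar] at this
        exact this
      · rw [if_neg (by exact_mod_cast hpar)]
        rw [if_neg hpar] at this
        exact this
  · have hguard : (((cs.length % tw : Nat) : Int) ≠ 0 ∨ ((cs.length / tw : Nat) : Int) < 2) := by
      by_contra hcon
      push Not at hcon
      exact h1 ⟨by exact_mod_cast hcon.1, by exact_mod_cast hcon.2⟩
    rw [if_pos hguard]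
    constructor
    · intro h; exact absurd h (by simp)
    · rintro ⟨ha, hb, -⟩; exact absurd ⟨ha, hb⟩ h1

-- the two characterisations coincide
lemma main_iff (cs : List Char) (tw : Nat) (hk : 1 ≤ tw)
    (htww : (cs.takeWhile (· == '0')).length = tw) :
    (cs.length % tw = 0 ∧ PySem.Set.len (PySem.Set.ofList cs) = 2 ∧
      cs = EpatN tw (cs.length / tw)) ↔
    (cs.length % tw = 0 ∧ 2 ≤ cs.length / tw ∧ cs = EpatN tw (cs.length / tw)) := by
  constructor
  · rintro ⟨hmod, hset, hpat⟩
    refine ⟨hmod, ?_, hpat⟩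
    set m := cs.length / tw with hm
    rcases Nat.lt_or_ge m 2 with hlt | hge
    · exfalso
      interval_cases m
      · rw [show EpatN tw 0 = [] by simp [EpatN]] at hpat
        rw [hpat] at htww
        simp at htww
        omega
      · have h1 : EpatN tw 1 = List.replicate tw '0' := by
          simp [EpatN, List.range_succ, altChar]
        rw [h1] at hpat
        have : (PySem.Set.ofList cs).length = 1 := by
          apply nodup_len_single
          · exact PySem.Set.nodup_ofList _
          · intro x
            rw [PySem.Set.mem_ofList, hpat, List.mem_replicate]
            constructor
            · exact fun h => h.2
            · exact fun h => ⟨by omega, h⟩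
        rw [PySem.Set.len, this] at hset
        exact absurd hset (by decide)
    · exact hge
  · rintro ⟨hmod, hm2, hpat⟩
    refine ⟨hmod, ?_, hpat⟩
    rw [hpat]
    exact setlen_EpatN tw _ hk hm2

-- ===== VERDICT (by name: the statement is the Claim_ definition above) =====
theorem consec_zero_test_spec : Claim_equal_consec_zero_test := by
  intro s1 _ hpre
  unfold Spec_consec_zero_test
  have hk := tw_pos s1 hpre
  rw [Bool.eq_iff_iff, A_true_iff s1 hpre, B_true_iff s1 hpre]
  exact main_iff s1.toList _ hk rfl
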